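-- pv_equiv track=rewrite | github.com/pypi-data/pypi-mirror-31 | packages/wyqpy/wyqpy-0.1.1.3-py2.py3-none-any.whl/wyqpy/math/prime.py | getNextPrimes
-- ===== SOURCE A (Python) =====
-- import math
--
-- def isPrime(n):
--     """
--     alter:from mpmath.libmp.libintmath import isprime
--     @param n: 大于0
--     @return: 判断n是否是质数
--     """
--     if n <= 1:
--         return False
--     for i in range(2, math.floor(math.sqrt(n)) + 1):
--         if n % i == 0:
--             return False
--     return True
--
-- def getNextPrime(startPrime):
--     if startPrime <= 0:
--         raise ValueError("startPrime 必须大于0 ")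
--     n = startPrime + 1
--     while (not isPrime(n)):
--         n += 1
--     return n
--
-- def getNextPrimes(startPrime, count):
--     cntu = True
--     ps = []
--     lp = startPrime
--     while (len(ps) < count):
--         p = getNextPrime(lp)
--         ps.append(p)
--         lp = p
--
--     return ps
-- ===== SOURCE B (Python) =====
-- def _divisible_by_base(n, base):
--     # base: odd primes in increasing order, containing all odd primes p with p*p <= n
--     for p in base:
--         if p * p > n:
--             return False
--         if n % p == 0:
--             return True
--     return False
--
-- def _extend_base(base, m, n):
--     # grow base (all odd primes in [3, m), increasing) until it covers sqrt(n);
--     # returns the new next-candidate m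
--     while m * m <= n:
--         if not _divisible_by_base(m, base):
--             base.append(m)
--         m += 2
--     return m
--
-- def getNextPrimes(startPrime, count):
--     if count <= 0:
--         return []
--     if startPrime <= 0:
--         raise ValueError("startPrime 必须大于0 ")
--     ps = []
--     if startPrime == 1:
--         ps.append(2)
--     n = startPrime + 1 if startPrime % 2 == 0 else startPrime + 2
--     base = []  # odd primes found so far, for trial division
--     m = 3      # next odd candidate to consider for base
--     while len(ps) < count:
--         m = _extend_base(base, m, n)
--         if not _divisible_by_base(n, base):
--             ps.append(n)
--         n += 2
--     return ps
-- ===== Notes on version B (the rewrite author's own statement) =====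
-- stated objective: faster
-- what changed: B scans odd candidates only and trial-divides each by a growing list of previously found base primes, stopping once p*p > n, instead of A's division of every candidate by every integer from 2 to floor(sqrt(n)).
import Mathlib
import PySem

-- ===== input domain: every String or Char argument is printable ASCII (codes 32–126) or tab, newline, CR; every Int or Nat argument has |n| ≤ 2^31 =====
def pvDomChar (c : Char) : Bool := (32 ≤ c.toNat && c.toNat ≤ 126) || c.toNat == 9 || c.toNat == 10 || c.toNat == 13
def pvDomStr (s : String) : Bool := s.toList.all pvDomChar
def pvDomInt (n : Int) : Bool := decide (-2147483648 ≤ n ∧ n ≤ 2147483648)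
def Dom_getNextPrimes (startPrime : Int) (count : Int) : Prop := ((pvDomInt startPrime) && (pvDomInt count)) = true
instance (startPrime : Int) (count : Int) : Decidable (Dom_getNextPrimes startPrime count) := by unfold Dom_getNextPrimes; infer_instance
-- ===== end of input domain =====

-- B replaces A's per-candidate trial division by every integer in 2..⌊√n⌋ with odd-only
-- candidates trial-divided by a growing list of previously found base primes (stopping at p² > n).

-- ===== PORT A =====
-- A's isPrime: math.floor(math.sqrt(n)) is the exact integer square root for the 0 ≤ n ≤ 2^31
-- inputs admitted here (double sqrt is correctly rounded), ported as Nat.sqrt; range(2, √n+1)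
-- is List.range' 2 (√n - 1). All numbers A handles stay positive, tracked as Nat.
def isPrimeA (n : Nat) : Bool :=
  if n ≤ 1 then false
  else (List.range' 2 (Nat.sqrt n - 1)).all (fun i => decide ¬(n % i = 0))

-- A's `while not isPrime(n): n += 1`; the fuel argument only makes the loop total
-- (Bertrand's postulate, proved below, shows it is never exhausted).
def findA : Nat → Nat → Nat
  | 0, n => n
  | fuel+1, n => if isPrimeA n then n else findA fuel (n + 1)

def getNextPrimeA (lp : Nat) : Nat := findA (lp + 2) (lp + 1)

-- A's `while len(ps) < count`: one prime appended per iteration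
def goA : Nat → Nat → List Nat
  | 0, _ => []
  | k+1, lp => let p := getNextPrimeA lp; p :: goA k p

-- when startPrime ≤ 0 and count > 0 the Python raises ValueError: those inputs are outside Pre_
def getNextPrimes (startPrime : Int) (count : Int) : List Int :=
  if 1 ≤ startPrime then (goA count.toNat startPrime.toNat).map Int.ofNat else []

-- ===== PORT B =====
-- B's `_divisible_by_base`
def divisibleByBase (n : Nat) : List Nat → Bool
  | [] => false
  | p :: rest =>
    if n < p * p then false
    else if n % p = 0 then true
    else divisibleByBase n rest

-- B's `_extend_base`: grow the base-prime list until it covers √n, return the new next candidate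
def extendBase (base : List Nat) (m n : Nat) : List Nat × Nat :=
  if h : m * m ≤ n then
    extendBase (if divisibleByBase m base then base else base ++ [m]) (m + 2) n
  else (base, m)
termination_by n + 2 - m
decreasing_by
  have hm : m = 0 ∨ m ≤ m * m := by
    rcases m with _ | m
    · exact Or.inl rfl
    · exact Or.inr (Nat.le_mul_of_pos_left _ (Nat.succ_pos _))
  omega

-- B's main `while len(ps) < count` loop over odd candidates n; the fuel argument only makes
-- the loop total (Bertrand's postulate shows it is never exhausted) and is refreshed whenever
-- a prime is appended.
def goB : Nat → Nat → Nat → List Nat → Nat → List Nat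
  | 0, _, _, _, _ => []
  | _+1, 0, _, _, _ => []
  | k+1, fuel+1, n, base, m =>
    let bm := extendBase base m n
    if divisibleByBase n bm.1 then goB (k+1) fuel (n + 2) bm.1 bm.2
    else n :: goB k (n + 3) (n + 2) bm.1 bm.2
termination_by k fuel _ _ _ => (k, fuel)

-- when startPrime ≤ 0 and count > 0 the Python raises ValueError: those inputs are outside Pre_
def getNextPrimes_alt (startPrime : Int) (count : Int) : List Int :=
  if count ≤ 0 then []
  else if startPrime ≤ 0 then []
  else
    let s := startPrime.toNat
    let head : List Nat := if s = 1 then [2] else []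
    let n : Nat := if s % 2 = 0 then s + 1 else s + 2
    ((head ++ goB (count.toNat - head.length) (n + 1) n [] 3).map Int.ofNat)

-- ===== PRECONDITION & SPEC =====
-- Pre_ excludes exactly the inputs on which the Python A raises ValueError
-- (startPrime ≤ 0 while count > 0); A returns normally everywhere else.
def Pre_getNextPrimes (startPrime : Int) (count : Int) : Prop :=
  count ≤ 0 ∨ 1 ≤ startPrime
instance (startPrime : Int) (count : Int) : Decidable (Pre_getNextPrimes startPrime count) := by
  unfold Pre_getNextPrimes; infer_instance

def pvWitness_getNextPrimes : Int × Int := (5, 3)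

def Spec_getNextPrimes (startPrime : Int) (count : Int) (out : List Int) : Prop :=
  out = getNextPrimes_alt startPrime count
instance (startPrime : Int) (count : Int) (out : List Int) : Decidable (Spec_getNextPrimes startPrime count out) := by
  unfold Spec_getNextPrimes; infer_instance

-- ===== CLAIM (what is proved, stated in full; the proofs are below) =====
def Claim_equal_getNextPrimes : Prop := ∀ (startPrime : Int) (count : Int), Dom_getNextPrimes startPrime count → Pre_getNextPrimes startPrime count → Spec_getNextPrimes startPrime count (getNextPrimes startPrime count)

-- ===== LEMMAS AND PROOFS =====

-- the least prime ≥ n (specification value both searches converge to)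
theorem lpgeEx (n : Nat) : ∃ p, n ≤ p ∧ Nat.Prime p := Nat.exists_infinite_primes n

def lpge (n : Nat) : Nat := Nat.find (lpgeEx n)

theorem le_lpge (n : Nat) : n ≤ lpge n := (Nat.find_spec (lpgeEx n)).1

theorem lpge_prime (n : Nat) : Nat.Prime (lpge n) := (Nat.find_spec (lpgeEx n)).2

theorem lpge_min {n p : Nat} (hp : Nat.Prime p) (hn : n ≤ p) : lpge n ≤ p :=
  Nat.find_min' (lpgeEx n) ⟨hn, hp⟩

theorem lpge_eq_self {n : Nat} (h : Nat.Prime n) : lpge n = n :=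
  le_antisymm (lpge_min h le_rfl) (le_lpge n)

theorem lpge_step {n : Nat} (h : ¬ Nat.Prime n) : lpge n = lpge (n + 1) := by
  refine le_antisymm (lpge_min (lpge_prime (n + 1)) (le_trans (Nat.le_succ n) (le_lpge (n + 1))))
    (lpge_min (lpge_prime n) ?_)
  have h1 := le_lpge n
  have h2 := lpge_prime n
  have h3 : lpge n ≠ n := fun he => h (he ▸ h2)
  omega

theorem lpge_bertrand (n : Nat) (h : 1 ≤ n) : lpge (n + 1) ≤ 2 * n := by
  obtain ⟨p, hp, h1, h2⟩ := Nat.exists_prime_lt_and_le_two_mul n (by omega)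
  exact le_trans (lpge_min hp (by omega)) h2

theorem even_not_prime {n : Nat} (h : n % 2 = 0) (h4 : 4 ≤ n) : ¬ Nat.Prime n := by
  intro hp
  rcases hp.eq_one_or_self_of_dvd 2 (Nat.dvd_of_mod_eq_zero h) with h2 | h2 <;> omega

theorem odd_of_prime_ge3 {p : Nat} (hp : Nat.Prime p) (h3 : 3 ≤ p) : p % 2 = 1 := by
  by_contra hc
  exact even_not_prime (by omega) (by omega) hp

theorem lpge_skip {n : Nat} (hodd : n % 2 = 1) (h3 : 3 ≤ n) (hnp : ¬ Nat.Prime n) :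
    lpge n = lpge (n + 2) := by
  rw [lpge_step hnp, lpge_step (even_not_prime (by omega) (by omega))]

-- A's primality test decides Nat.Prime
theorem isPrimeA_iff (n : Nat) : isPrimeA n = true ↔ Nat.Prime n := by
  unfold isPrimeA
  split
  · rename_i h
    simp only [Bool.false_eq_true, false_iff]
    intro hp
    have := hp.two_le
    omega
  · rename_i h
    rw [List.all_eq_true]
    constructor
    · intro hall
      rw [Nat.prime_def_le_sqrt]
      refine ⟨by omega, fun m h2 hle hdvd => ?_⟩
      have hs : 1 ≤ Nat.sqrt n := Nat.le_sqrt.mpr (by omega)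
      have hm : m ∈ List.range' 2 (Nat.sqrt n - 1) :=
        List.mem_range'.mpr ⟨m - 2, by omega, by omega⟩
      have := hall m hm
      simp only [decide_eq_true_eq] at this
      exact this (Nat.mod_eq_zero_of_dvd hdvd)
    · intro hp i hi
      obtain ⟨j, hj, hij⟩ := List.mem_range'.mp hi
      have h2 : 2 ≤ i := by omega
      have hle : i ≤ Nat.sqrt n := by omega
      simp only [decide_eq_true_eq]
      intro hmod
      exact (Nat.prime_def_le_sqrt.mp hp).2 i h2 hle (Nat.dvd_of_mod_eq_zero hmod)

-- A's inner search finds the least prime, given enough fuel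
theorem findA_eq : ∀ fuel n, lpge n < n + fuel → findA fuel n = lpge n := by
  intro fuel
  induction fuel with
  | zero => intro n h; exact absurd (le_lpge n) (by omega)
  | succ fuel ih =>
    intro n h
    unfold findA
    by_cases hp : Nat.Prime n
    · rw [if_pos ((isPrimeA_iff n).mpr hp), lpge_eq_self hp]
    · rw [if_neg (fun hc => hp ((isPrimeA_iff n).mp hc)), lpge_step hp]
      exact ih (n + 1) (by have := lpge_step hp; omega)

-- the chain of successive least primes that A produces
def specList : Nat → Nat → List Nat
  | 0, _ => []
  | k+1, lp => lpge (lp + 1) :: specList k (lpge (lp + 1))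

-- the same chain, indexed by B's odd starting candidate
def specFrom : Nat → Nat → List Nat
  | 0, _ => []
  | k+1, n => lpge n :: specFrom k (lpge n + 2)

theorem goA_eq : ∀ k lp, 1 ≤ lp → goA k lp = specList k lp := by
  intro k
  induction k with
  | zero => intro lp _; rfl
  | succ k ih =>
    intro lp h1
    have hb : lpge (lp + 1) ≤ 2 * lp := lpge_bertrand lp h1
    have hf : findA (lp + 2) (lp + 1) = lpge (lp + 1) := findA_eq _ _ (by omega)
    have hp2 : 2 ≤ lpge (lp + 1) := (lpge_prime (lp + 1)).two_le
    simp only [goA, getNextPrimeA, hf, specList]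
    rw [ih (lpge (lp + 1)) (by omega)]

theorem specFrom_eq_specList : ∀ k lp n, 2 ≤ lp → n % 2 = 1 → lp < n → n ≤ lp + 2 →
    specFrom k n = specList k lp := by
  intro k
  induction k with
  | zero => intro lp n _ _ _ _; rfl
  | succ k ih =>
    intro lp n h2 hodd hlt hle
    have key : lpge n = lpge (lp + 1) := by
      rcases Nat.eq_or_lt_of_le (Nat.succ_le_of_lt hlt) with he | hl
      · rw [← he]
      · have hn : n = lp + 2 := by omega
        have hev : (lp + 1) % 2 = 0 := by omega
        rw [hn, lpge_step (even_not_prime hev (by omega))]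
    have hp := lpge_prime n
    have h3 : 3 ≤ lpge n := by have := le_lpge n; omega
    have hodd' : lpge n % 2 = 1 := odd_of_prime_ge3 hp h3
    simp only [specFrom, specList, key]
    rw [← key]
    exact congrArg _ (ih (lpge n) (lpge n + 2) (by omega) (by omega) (by omega) (by omega))

-- the base list B maintains: exactly the odd primes in [3, 3 + 2k)
def OPB (k : Nat) : List Nat := (List.range' 3 k 2).filter (fun x => decide (Nat.Prime x))

theorem opb_mem {k p : Nat} (h : p ∈ OPB k) : Nat.Prime p ∧ 3 ≤ p ∧ p < 3 + 2 * k := by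
  unfold OPB at h
  rw [List.mem_filter] at h
  obtain ⟨i, hi, hp⟩ := List.mem_range'.mp h.1
  have := of_decide_eq_true h.2
  exact ⟨this, by omega, by omega⟩

theorem mem_opb {k p : Nat} (hp : Nat.Prime p) (hodd : p % 2 = 1) (h3 : 3 ≤ p)
    (hlt : p < 3 + 2 * k) : p ∈ OPB k := by
  unfold OPB
  rw [List.mem_filter]
  exact ⟨List.mem_range'.mpr ⟨(p - 3) / 2, by omega, by omega⟩, decide_eq_true hp⟩

theorem range'_pairwise_lt (s : Nat) : ∀ k, (List.range' s k 2).Pairwise (· < ·) := by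
  intro k
  induction k with
  | zero => exact List.Pairwise.nil
  | succ k ih =>
    rw [List.range'_concat, List.pairwise_append]
    refine ⟨ih, List.pairwise_singleton _ _, fun a ha b hb => ?_⟩
    obtain ⟨i, hi, hai⟩ := List.mem_range'.mp ha
    rw [List.mem_singleton] at hb
    omega

theorem opb_pairwise (k : Nat) : (OPB k).Pairwise (· < ·) :=
  (range'_pairwise_lt 3 k).filter _

theorem opb_succ (k : Nat) :
    OPB (k + 1) = OPB k ++ (if Nat.Prime (3 + 2 * k) then [3 + 2 * k] else []) := by
  unfold OPB
  rw [List.range'_concat, List.filter_append]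
  congr 1
  by_cases hp : Nat.Prime (3 + 2 * k) <;> simp [List.filter, hp]

-- correctness of B's divisibility scan against a sorted, complete list of prime divisors
theorem DB_correct : ∀ (l : List Nat) (n : Nat), 3 ≤ n →
    (∀ p ∈ l, Nat.Prime p ∧ 3 ≤ p) → l.Pairwise (· < ·) →
    (∀ p, Nat.Prime p → p ∣ n → p * p ≤ n → p ∈ l) →
    (divisibleByBase n l = true ↔ ¬ Nat.Prime n) := by
  intro l
  induction l with
  | nil =>
    intro n h3 _ _ hcomp
    simp only [divisibleByBase, Bool.false_eq_true, false_iff, not_not]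
    by_contra hnp
    have hq := Nat.minFac_prime (show n ≠ 1 by omega)
    have hsq : n.minFac * n.minFac ≤ n := by
      have := Nat.minFac_sq_le_self (show 0 < n by omega) hnp
      rwa [Nat.pow_two] at this
    exact absurd (hcomp n.minFac hq (Nat.minFac_dvd n) hsq) (List.not_mem_nil)
  | cons p l ih =>
    intro n h3 hmem hpw hcomp
    have hp := (hmem p (List.mem_cons_self)).1
    have hp3 := (hmem p (List.mem_cons_self)).2
    unfold divisibleByBase
    by_cases hlt : n < p * p
    · rw [if_pos hlt]
      simp only [Bool.false_eq_true, false_iff, not_not]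
      by_contra hnp
      have hq := Nat.minFac_prime (show n ≠ 1 by omega)
      have hsq : n.minFac * n.minFac ≤ n := by
        have := Nat.minFac_sq_le_self (show 0 < n by omega) hnp
        rwa [Nat.pow_two] at this
      have hmem' := hcomp n.minFac hq (Nat.minFac_dvd n) hsq
      rcases List.mem_cons.mp hmem' with he | hl
      · rw [he] at hsq; omega
      · have hplt : p < n.minFac := (List.pairwise_cons.mp hpw).1 _ hl
        have : p * p < n.minFac * n.minFac := Nat.mul_lt_mul_of_lt_of_lt hplt hplt
        omega
    · rw [if_neg hlt]
      by_cases hmod : n % p = 0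
      · rw [if_pos hmod]
        simp only [true_iff]
        intro hn
        have hdvd : p ∣ n := Nat.dvd_of_mod_eq_zero hmod
        rcases hn.eq_one_or_self_of_dvd p hdvd with he | he
        · omega
        · have : p < p * p := by nlinarith
          omega
      · rw [if_neg hmod]
        refine ih n h3 (fun q hq => hmem q (List.mem_cons_of_mem _ hq))
          (List.pairwise_cons.mp hpw).2 (fun q hq hqd hqs => ?_)
        rcases List.mem_cons.mp (hcomp q hq hqd hqs) with he | hl
        · exact absurd (Nat.mod_eq_zero_of_dvd (he ▸ hqd)) hmod
        · exact hl

theorem DB_opb {k n : Nat} (hodd : n % 2 = 1) (h3 : 3 ≤ n)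
    (hcov : n < (3 + 2 * k) * (3 + 2 * k)) :
    (divisibleByBase n (OPB k) = true ↔ ¬ Nat.Prime n) := by
  refine DB_correct (OPB k) n h3 (fun p hp => ⟨(opb_mem hp).1, (opb_mem hp).2.1⟩)
    (opb_pairwise k) (fun p hp hpd hps => ?_)
  have hp2 := hp.two_le
  have hpodd : p % 2 = 1 := by
    by_contra hc
    have h2p : 2 ∣ p := Nat.dvd_of_mod_eq_zero (by omega)
    have h2n : 2 ∣ n := h2p.trans hpd
    have := Nat.mod_eq_zero_of_dvd h2n
    omega
  have hlt : p < 3 + 2 * k := by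
    by_contra hc
    have : (3 + 2 * k) * (3 + 2 * k) ≤ p * p :=
      Nat.mul_le_mul (by omega) (by omega)
    omega
  exact mem_opb hp hpodd (by omega) hlt

theorem extendBase_eq : ∀ d k0 n, n ≤ 3 + 2 * k0 + 2 * d →
    ∃ k1, extendBase (OPB k0) (3 + 2 * k0) n = (OPB k1, 3 + 2 * k1) ∧
      n < (3 + 2 * k1) * (3 + 2 * k1) := by
  intro d
  induction d with
  | zero =>
    intro k0 n hle
    have hguard : ¬ ((3 + 2 * k0) * (3 + 2 * k0) ≤ n) := by
      intro hc
      have h9 : 3 * (3 + 2 * k0) ≤ (3 + 2 * k0) * (3 + 2 * k0) :=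
        Nat.mul_le_mul (by omega) le_rfl
      omega
    refine ⟨k0, ?_, by omega⟩
    rw [extendBase, dif_neg hguard]
  | succ d ih =>
    intro k0 n hle
    by_cases hg : (3 + 2 * k0) * (3 + 2 * k0) ≤ n
    · rw [extendBase, dif_pos hg]
      have hm3 : 3 ≤ 3 + 2 * k0 := by omega
      have hself : (3 + 2 * k0) < (3 + 2 * k0) * (3 + 2 * k0) := by nlinarith
      have htest : divisibleByBase (3 + 2 * k0) (OPB k0) = true ↔ ¬ Nat.Prime (3 + 2 * k0) :=
        DB_opb (by omega) (by omega) hself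
      have hbase :
          (if divisibleByBase (3 + 2 * k0) (OPB k0) then OPB k0 else OPB k0 ++ [3 + 2 * k0]) =
            OPB (k0 + 1) := by
        by_cases hp : Nat.Prime (3 + 2 * k0)
        · rw [if_neg (by simp [htest, hp]), opb_succ, if_pos hp]
        · rw [if_pos (htest.mpr hp), opb_succ, if_neg hp, List.append_nil]
      rw [hbase, show (3 + 2 * k0) + 2 = 3 + 2 * (k0 + 1) by ring]
      exact ih (k0 + 1) n (by omega)
    · refine ⟨k0, ?_, by omega⟩
      rw [extendBase, dif_neg hg]

theorem extendBase_eq' (k0 n : Nat) :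
    ∃ k1, extendBase (OPB k0) (3 + 2 * k0) n = (OPB k1, 3 + 2 * k1) ∧
      n < (3 + 2 * k1) * (3 + 2 * k1) :=
  extendBase_eq n k0 n (by omega)

theorem goB_eq : ∀ k fuel n k0, n % 2 = 1 → 3 ≤ n → lpge n < n + 2 * fuel →
    goB k fuel n (OPB k0) (3 + 2 * k0) = specFrom k n := by
  intro k
  induction k with
  | zero =>
    intro fuel n k0 _ _ _
    cases fuel <;> simp [goB, specFrom]
  | succ k ihk =>
    intro fuel
    induction fuel with
    | zero =>
      intro n k0 _ _ h
      exact absurd (le_lpge n) (by omega)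
    | succ fuel ihf =>
      intro n k0 hodd h3 hfuel
      obtain ⟨k1, heq, hcov⟩ := extendBase_eq' k0 n
      have htest := DB_opb (k := k1) hodd h3 hcov
      rw [goB]
      simp only [heq]
      by_cases hp : Nat.Prime n
      · rw [if_neg (by simp [htest, hp])]
        have hb : lpge (n + 2) ≤ 2 * (n + 1) := lpge_bertrand (n + 1) (by omega)
        have hrec := ihk (n + 3) (n + 2) k1 (by omega) (by omega) (by omega)
        simp only [specFrom, lpge_eq_self hp, hrec]
      · rw [if_pos (htest.mpr hp)]
        have hstep : lpge n = lpge (n + 2) := lpge_skip hodd h3 hp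
        have hrec := ihf (n + 2) k1 (by omega) (by omega) (by omega)
        rw [hrec]
        simp only [specFrom, ← hstep]

theorem goB_top (k n : Nat) (hodd : n % 2 = 1) (h3 : 3 ≤ n) :
    goB k (n + 1) n [] 3 = specFrom k n := by
  have hfuel : lpge n < n + 2 * (n + 1) := by
    have hb := lpge_bertrand (n - 1) (by omega)
    rw [show n - 1 + 1 = n by omega] at hb
    omega
  have := goB_eq k (n + 1) n 0 hodd h3 hfuel
  simpa using this

-- the two Nat-level computations agree
theorem combine (k s : Nat) (hs : 1 ≤ s) (hk : 1 ≤ k) :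
    goA k s =
      (if s = 1 then [2] else []) ++
        goB (k - (if s = 1 then ([2] : List Nat) else []).length)
          ((if s % 2 = 0 then s + 1 else s + 2) + 1) (if s % 2 = 0 then s + 1 else s + 2) [] 3 := by
  by_cases h1 : s = 1
  · subst h1
    obtain ⟨j, rfl⟩ : ∃ j, k = j + 1 := ⟨k - 1, by omega⟩
    have h2 : lpge 2 = 2 := lpge_eq_self Nat.prime_two
    have hgb := goB_top j 3 (by omega) (by omega)
    rw [specFrom_eq_specList j 2 3 (by omega) (by omega) (by omega) (by omega)] at hgb
    norm_num at hgb ⊢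
    rw [goA_eq (j + 1) 1 (by omega), hgb]
    simp [specList, h2]
  · have hs2 : 2 ≤ s := by omega
    rw [if_neg h1]
    simp only [List.nil_append, List.length_nil, Nat.sub_zero]
    by_cases hev : s % 2 = 0
    · rw [if_pos hev, goA_eq k s (by omega), goB_top k (s + 1) (by omega) (by omega)]
      exact (specFrom_eq_specList k s (s + 1) hs2 (by omega) (by omega) (by omega)).symm
    · rw [if_neg hev, goA_eq k s (by omega), goB_top k (s + 2) (by omega) (by omega)]
      exact (specFrom_eq_specList k s (s + 2) hs2 (by omega) (by omega) (by omega)).symm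

-- ===== VERDICT (by name: the statement is the Claim_ definition above) =====
theorem getNextPrimes_spec : Claim_equal_getNextPrimes := by
  unfold Claim_equal_getNextPrimes
  intro s c _ hpre
  unfold Spec_getNextPrimes getNextPrimes getNextPrimes_alt
  by_cases hc : c ≤ 0
  · rw [if_pos hc]
    have hc0 : c.toNat = 0 := by omega
    split <;> simp [hc0, goA]
  · have hs : 1 ≤ s := by
      rcases hpre with h | h
      · exact absurd h hc
      · exact h
    rw [if_pos hs, if_neg hc, if_neg (by omega : ¬ s ≤ 0)]
    have hk : 1 ≤ c.toNat := by omega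
    have hs1 : 1 ≤ s.toNat := by omega
    simp only []
    rw [combine c.toNat s.toNat hs1 hk]
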